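-- pv_equiv track=rewrite | github.com/tsouvarev/advent_of_code | 2017/09_stream_processing/part_1.py | _clean_stream
-- ===== SOURCE A (Python) =====
-- from collections.abc import Iterator
--
-- def _clean_stream(stream: str) -> Iterator[str]:
--     ignore_next, inside_garbage = False, False
--
--     for c in stream:
--         if ignore_next:
--             ignore_next = False
--             continue
--
--         match c:
--             case "!":
--                 ignore_next = True
--             case "<":
--                 inside_garbage = True
--             case ">":
--                 inside_garbage = False
--             case _ if not inside_garbage:
--                 yield c
-- ===== SOURCE B (Python) =====
-- from collections.abc import Iterator
--
-- def _clean_stream(stream: str) -> Iterator[str]: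
--     # pass 1: remove escape pairs ('!' plus the following character)
--     chars = []
--     it = iter(stream)
--     for c in it:
--         if c == "!":
--             next(it, None)
--         else:
--             chars.append(c)
--     # pass 2: drop garbage regions via a nested skip loop over a shared iterator;
--     # a stray '>' outside garbage is also dropped (it only closes garbage)
--     it = iter(chars)
--     for c in it:
--         if c == "<":
--             for d in it:
--                 if d == ">":
--                     break
--         elif c != ">":
--             yield c
-- ===== Notes on version B (the rewrite author's own statement) =====
-- stated objective: alternative
-- what changed: Replaces A's single pass with two boolean flags by a staged design with no state flags: a first pass deletes escape pairs, then a second pass removes garbage by a nested skip-until-'>' loop over a shared iterator.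
import Mathlib
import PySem

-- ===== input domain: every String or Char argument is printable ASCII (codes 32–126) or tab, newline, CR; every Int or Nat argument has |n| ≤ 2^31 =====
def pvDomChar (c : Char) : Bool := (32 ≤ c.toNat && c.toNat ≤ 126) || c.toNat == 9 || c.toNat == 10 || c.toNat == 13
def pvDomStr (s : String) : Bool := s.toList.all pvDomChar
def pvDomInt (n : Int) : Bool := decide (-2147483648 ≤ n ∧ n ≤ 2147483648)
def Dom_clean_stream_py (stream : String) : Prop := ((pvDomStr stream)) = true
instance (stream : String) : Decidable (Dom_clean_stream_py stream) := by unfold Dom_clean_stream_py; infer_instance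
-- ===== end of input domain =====

-- B replaces A's one-pass two-flag scanner with two staged passes (strip escape pairs, then drop garbage via a nested skip loop); same values, same cost (objective: alternative).


-- ===== PORT A =====
-- for-loop over the characters carrying the two flags (ignore_next, inside_garbage); yields are collected in order
def cleanA (ignoreNext insideGarbage : Bool) : List Char → List String
  | [] => []
  | c :: rest =>
    if ignoreNext then cleanA false insideGarbage rest
    else if c = '!' then cleanA true insideGarbage rest
    else if c = '<' then cleanA ignoreNext true rest
    else if c = '>' then cleanA ignoreNext false rest
    else if !insideGarbage then c.toString :: cleanA ignoreNext insideGarbage rest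
    else cleanA ignoreNext insideGarbage rest

def clean_stream_py (stream : String) : List String :=
  cleanA false false stream.toList

-- ===== PORT B =====
-- pass 1 of Source B: delete each '!' together with the following character
def stripEscapes : List Char → List Char
  | [] => []
  | c :: rest =>
    if c = '!' then stripEscapes (rest.drop 1)
    else c :: stripEscapes rest
termination_by l => l.length
decreasing_by all_goals simp

-- pass 2 of Source B: the outer loop emits until '<' hands control to the inner skip-until-'>' loop
mutual
def emitClean : List Char → List String
  | [] => []
  | c :: rest =>
    if c = '<' then skipGarbage rest
    else if c = '>' then emitClean rest
    else c.toString :: emitClean rest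
def skipGarbage : List Char → List String
  | [] => []
  | d :: rest =>
    if d = '>' then emitClean rest
    else skipGarbage rest
end

def clean_stream_py_alt (stream : String) : List String :=
  emitClean (stripEscapes stream.toList)

-- ===== PRECONDITION & SPEC =====
def Spec_clean_stream_py (stream : String) (out : List String) : Prop := out = clean_stream_py_alt stream
instance (stream : String) (out : List String) : Decidable (Spec_clean_stream_py stream out) := by unfold Spec_clean_stream_py; infer_instance

-- ===== CLAIM =====
def Claim_equal_clean_stream_py : Prop := ∀ (stream : String), Dom_clean_stream_py stream → Spec_clean_stream_py stream (clean_stream_py stream)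

-- ===== LEMMAS AND PROOFS =====
theorem cleanA_eq_staged (l : List Char) :
    cleanA false false l = emitClean (stripEscapes l) ∧
    cleanA false true l = skipGarbage (stripEscapes l) := by
  induction l using stripEscapes.induct with
  | case1 => simp [cleanA, stripEscapes, emitClean, skipGarbage]
  | case2 rest ih =>
    cases rest with
    | nil => simp [cleanA, stripEscapes, emitClean, skipGarbage]
    | cons d rest' =>
      simp only [List.drop] at ih
      simp only [cleanA, stripEscapes, List.drop]
      simp only [reduceIte]
      exact ih
  | case3 c rest h ih =>
    by_cases hlt : c = '<'
    · subst hlt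
      simp [cleanA, stripEscapes, emitClean, skipGarbage, ih.2]
    · by_cases hgt : c = '>'
      · subst hgt
        simp [cleanA, stripEscapes, emitClean, skipGarbage, ih.1]
      · simp [cleanA, stripEscapes, emitClean, skipGarbage, h, hlt, hgt, ih.1, ih.2]

-- ===== VERDICT =====
theorem clean_stream_py_spec : Claim_equal_clean_stream_py := by
  intro stream _
  unfold Spec_clean_stream_py clean_stream_py clean_stream_py_alt
  exact (cleanA_eq_staged stream.toList).1
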